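-- pv_equiv track=rewrite | github.com/AnshikSahu/COL215 | COL215assignment2.py | convert
-- ===== SOURCE A (Python) =====
-- def convert(string):# converts the term given as a string to a list of litersls
--     term=[]
--     c=""
--     for e in string:
--         if(e.isalpha()):
--             term.append(c)
--             c=""
--         c+=e
--     return term[1:]+[c]
-- ===== SOURCE B (Python) =====
-- def convert(string):  # converts the term given as a string to a list of literals
--     def lead(s):
--         # maximal non-letter prefix of s, and the remainder starting at the first letter
--         for k, ch in enumerate(s):
--             if ch.isalpha():
--                 return s[:k], s[k:]
--         return s, ""
--
--     _, rest = lead(string)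
--     if not rest:
--         return [string]
--     out = []
--     while rest:
--         head, tail = lead(rest[1:])
--         out.append(rest[0] + head)
--         rest = tail
--     return out
-- ===== Notes on version B (the rewrite author's own statement) =====
-- stated objective: alternative
-- what changed: Replaces A's char-by-char accumulator loop (pending-literal string plus a list, with a drop-first fixup at the end) by a two-phase decomposition: split off the non-letter prefix once, then repeatedly slice off one letter-headed chunk; it trades A's single pass for slice copies, so it is not faster.
import Mathlib
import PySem

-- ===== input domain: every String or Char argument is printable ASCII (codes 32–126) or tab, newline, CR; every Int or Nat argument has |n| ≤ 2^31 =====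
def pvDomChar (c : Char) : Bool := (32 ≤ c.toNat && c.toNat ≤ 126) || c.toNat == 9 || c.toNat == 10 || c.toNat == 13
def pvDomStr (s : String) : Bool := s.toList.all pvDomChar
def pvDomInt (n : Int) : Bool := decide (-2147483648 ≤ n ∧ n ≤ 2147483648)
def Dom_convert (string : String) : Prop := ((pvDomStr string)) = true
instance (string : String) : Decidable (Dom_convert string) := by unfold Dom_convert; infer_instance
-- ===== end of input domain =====

-- B is an alternative two-phase re-implementation: skip the non-letter prefix, then emit
-- letter-headed chunks by repeated prefix splitting, instead of A's char-by-char accumulator.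

-- ===== PORT A =====
-- A's loop state: (term, c) with c the pending literal, as List Char pieces.
def convert (string : String) : List String :=
  let st := string.toList.foldl
    (fun (st : List (List Char) × List Char) e =>
      let st := if PySem.Chars.isalpha e then (st.1 ++ [st.2], ([] : List Char)) else st
      (st.1, st.2 ++ [e]))
    ([], [])
  ((st.1.drop 1) ++ [st.2]).map String.ofList

-- ===== PORT B =====
-- lead(s): maximal non-letter prefix and the remainder starting at the first letter
def pvLead : List Char → List Char × List Char
  | [] => ([], [])
  | ch :: s =>
    if PySem.Chars.isalpha ch then ([], ch :: s)
    else
      let (p, r) := pvLead s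
      (ch :: p, r)

theorem pvLead_snd_length (s : List Char) : (pvLead s).2.length ≤ s.length := by
  induction s with
  | nil => simp [pvLead]
  | cons ch s ih =>
    simp only [pvLead]
    split
    · simp
    · simpa using Nat.le_succ_of_le ih

-- the while loop of B: each chunk is a letter plus the following non-letters
def pvChunks : List Char → List (List Char)
  | [] => []
  | e :: rest => (e :: (pvLead rest).1) :: pvChunks ((pvLead rest).2)
termination_by l => l.length
decreasing_by
  simpa using Nat.lt_succ_of_le (pvLead_snd_length rest)

def convert_alt (string : String) : List String :=
  let rest := (pvLead string.toList).2
  if rest = [] then [string]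
  else (pvChunks rest).map String.ofList

-- ===== PRECONDITION & SPEC =====
def Spec_convert (string : String) (out : List String) : Prop := out = convert_alt string
instance (string : String) (out : List String) : Decidable (Spec_convert string out) := by unfold Spec_convert; infer_instance

-- ===== CLAIM (what is proved, stated in full; the proofs are below) =====
def Claim_equal_convert : Prop := ∀ (string : String), Dom_convert string → Spec_convert string (convert string)

-- ===== LEMMAS AND PROOFS =====

theorem pvLead_fst_append_snd (s : List Char) : (pvLead s).1 ++ (pvLead s).2 = s := by
  induction s with
  | nil => simp [pvLead]
  | cons ch s ih =>
    simp only [pvLead]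
    split
    · simp
    · simpa using ih

-- characterization of A's fold starting from pending literal c: (emitted literals, final pending)
def pvG : List Char → List Char → List (List Char) × List Char
  | c, [] => ([], c)
  | c, e :: l =>
    if PySem.Chars.isalpha e then
      let p := pvG [e] l
      (c :: p.1, p.2)
    else pvG (c ++ [e]) l

theorem pvChunks_nil : pvChunks [] = [] := by rw [pvChunks]

theorem pvChunks_cons (e : Char) (rest : List Char) :
    pvChunks (e :: rest) = (e :: (pvLead rest).1) :: pvChunks ((pvLead rest).2) := by
  rw [pvChunks]

theorem pvFold_eq (l : List Char) : ∀ (term : List (List Char)) (c : List Char),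
    l.foldl
      (fun (st : List (List Char) × List Char) e =>
        let st := if PySem.Chars.isalpha e then (st.1 ++ [st.2], ([] : List Char)) else st
        (st.1, st.2 ++ [e]))
      (term, c)
    = (term ++ (pvG c l).1, (pvG c l).2) := by
  induction l with
  | nil => intro term c; simp [pvG]
  | cons e l ih =>
    intro term c
    by_cases h : PySem.Chars.isalpha e = true
    · simp only [List.foldl_cons, h, if_pos, pvG, ih]
      simp [h]
    · simp only [List.foldl_cons, pvG, h, if_neg, ih]
      simp [h]

theorem pvG_chunks (l : List Char) : ∀ c,
    (pvG c l).1 ++ [(pvG c l).2] = (c ++ (pvLead l).1) :: pvChunks ((pvLead l).2) := by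
  induction l with
  | nil => intro c; simp [pvG, pvLead, pvChunks_nil]
  | cons e l ih =>
    intro c
    by_cases h : PySem.Chars.isalpha e = true
    · simp only [pvG, pvLead, h, if_pos, List.cons_append]
      rw [ih [e]]
      simp [pvChunks_cons]
    · simp only [pvG, pvLead, h, if_neg, Bool.false_eq_true, not_false_iff]
      rw [ih (c ++ [e])]
      simp

-- ===== VERDICT (by name: the statement is the Claim_ definition above) =====
theorem convert_spec : Claim_equal_convert := by
  intro string _
  unfold Spec_convert convert convert_alt
  rw [pvFold_eq]
  have h := pvG_chunks string.toList []
  simp only [List.nil_append] at h ⊢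
  by_cases hr : (pvLead string.toList).2 = []
  · -- no letter: pvChunks [] = [], so pvG has no emitted literals and pending = whole string
    rw [hr] at h
    rw [pvChunks_nil] at h
    have h1 : (pvG [] string.toList).1 = [] := by
      rcases e : (pvG [] string.toList).1 with _ | ⟨x, xs⟩
      · rfl
      · rw [e] at h
        rcases xs with _ | ⟨y, ys⟩ <;> simp at h
    have h2 : (pvG [] string.toList).2 = (pvLead string.toList).1 := by
      rw [h1] at h; simpa using h
    have hp : (pvLead string.toList).1 = string.toList := by
      have := pvLead_fst_append_snd string.toList
      rw [hr] at this; simpa using this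
    simp [hr, h1, h2, hp]
  · -- at least one letter
    rcases e2 : (pvLead string.toList).2 with _ | ⟨x, xs⟩
    · exact absurd e2 hr
    have hne : (pvG [] string.toList).1 ≠ [] := by
      intro h1
      rw [h1, e2] at h
      rw [pvChunks_cons] at h
      simp at h
    rw [if_neg (List.cons_ne_nil x xs)]
    have : ((pvG [] string.toList).1 ++ [(pvG [] string.toList).2]).drop 1
         = (pvG [] string.toList).1.drop 1 ++ [(pvG [] string.toList).2] := by
      rcases e1 : (pvG [] string.toList).1 with _ | ⟨y, ys⟩
      · exact absurd e1 hne
      · simp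
    rw [← this, h, e2]
    simp
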